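-- pv_equiv track=rewrite | github.com/mingerfan/AlgorithmPractice | codeforce/Round 1004/B.py | solve
-- ===== SOURCE A (Python) =====
-- def solve(n: int, case: list):
--     case = sorted(case)
--     repeat = 0
--     target = case[0]
--     for i in range(0, len(case)):
--         if target == case[i]:
--             repeat += 1
--             if repeat > 2:
--                 cnt = 0
--                 while cnt + i < len(case) and case[cnt + i] == target:
--                     case[cnt + i] += 1
--                     cnt += 1
--                 target = case[i]
--                 repeat = 1
--         else:
--             if repeat < 2:
--                 return False
--             target = case[i]
--             repeat = 1
--     return True
-- ===== SOURCE B (Python) =====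
-- def solve(n: int, case: list):
--     # One linear pass over runs of the sorted list, carrying surplus copies
--     # upward as a count instead of rewriting list elements in place.
--     case = sorted(case)
--     N = len(case)
--     t = 2   # size of the previous (possibly carried) group; sentinel
--     cv = 0  # value that group sits at
--     i = 0
--     while i < N:
--         v = case[i]
--         c = 0
--         while i < N and case[i] == v:   # measure the run of v
--             c += 1
--             i += 1
--         while t > 2 and cv + 1 < v:     # walk the carry chain up to v
--             t -= 2
--             cv += 1
--         if t > 2 and cv + 1 == v:       # carry merges into this run
--             t = (t - 2) + c
--         elif t < 2:                     # previous group deficient, more follow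
--             return False
--         else:
--             t = c
--         cv = v
--     return True
-- ===== Notes on version B (the rewrite author's own statement) =====
-- stated objective: faster
-- what changed: A rescans and rewrites the sorted list in place every time a value occurs a third time (quadratic on duplicate-heavy input); B makes one linear pass over the runs of the sorted list, keeping the surplus of the previous run as a numeric carry (value, count) instead of mutating list elements.
import Mathlib
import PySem

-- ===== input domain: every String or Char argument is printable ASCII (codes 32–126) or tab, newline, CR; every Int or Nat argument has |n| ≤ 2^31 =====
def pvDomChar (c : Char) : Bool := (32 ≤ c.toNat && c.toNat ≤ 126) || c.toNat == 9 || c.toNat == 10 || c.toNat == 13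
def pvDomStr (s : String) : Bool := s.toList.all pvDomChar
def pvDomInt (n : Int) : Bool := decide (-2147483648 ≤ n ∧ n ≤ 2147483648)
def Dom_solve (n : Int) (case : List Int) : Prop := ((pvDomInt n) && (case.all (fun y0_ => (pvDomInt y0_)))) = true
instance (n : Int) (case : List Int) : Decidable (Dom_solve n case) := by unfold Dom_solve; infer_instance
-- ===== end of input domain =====

-- B is one linear pass over the runs of the sorted list carrying surpluses as a count,
-- instead of A's in-place rewriting of the sorted list (quadratic on duplicate-heavy input).

-- ===== PORT A =====
-- inner while loop: "while cnt + i < len(case) and case[cnt+i] == target: case[cnt+i] += 1"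
def bumpRun (target : Int) : List Int → List Int
  | [] => []
  | y :: ys => if y = target then (y + 1) :: bumpRun target ys else y :: ys

theorem bumpRun_length (target : Int) (l : List Int) : (bumpRun target l).length = l.length := by
  induction l with
  | nil => rfl
  | cons y ys ih => by_cases h : y = target <;> simp [bumpRun, h, ih]

-- the for-loop over i, as recursion over the still-unvisited suffix of `case`
-- (the loop only ever reads/writes indices ≥ i, so the suffix is the whole state)
def procA : List Int → Int → Int → Bool
  | [], _, _ => true
  | x :: xs, target, rep =>
    if x = target then
      if rep + 1 > 2 then
        -- case[i..] bumped; target = case[i] (= x+1); repeat = 1; advance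
        procA (bumpRun target xs) (x + 1) 1
      else
        procA xs target (rep + 1)
    else
      if rep < 2 then false
      else procA xs x 1
termination_by l _ _ => l.length
decreasing_by
  · simp [bumpRun_length]
  · simp
  · simp

def solve (n : Int) (case : List Int) : Bool :=
  match PySem.List.sorted case (fun x => x) false with
  | [] => true   -- unreachable under Pre_solve: Python raises IndexError at case[0]
  | x :: xs => procA (x :: xs) x 0   -- target = case[0], repeat = 0

-- ===== PORT B =====
-- inner while measuring the run of v: "while i < N and case[i] == v: c += 1; i += 1"
def countRun (v : Int) : List Int → Nat × List Int
  | [] => (0, [])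
  | x :: xs => if x = v then ((countRun v xs).1 + 1, (countRun v xs).2) else (0, x :: xs)

theorem countRun_snd_length (v : Int) (l : List Int) : (countRun v l).2.length ≤ l.length := by
  induction l with
  | nil => simp [countRun]
  | cons x xs ih =>
    by_cases h : x = v <;> simp [countRun, h]
    omega

-- "while t > 2 and cv + 1 < v: t -= 2; cv += 1"
def gapB (t cv v : Int) : Int × Int :=
  if t > 2 ∧ cv + 1 < v then gapB (t - 2) (cv + 1) v else (t, cv)
termination_by t.toNat
decreasing_by omega

-- outer while over the sorted list, one iteration per run
def procB : List Int → Int → Int → Bool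
  | [], _, _ => true
  | x :: xs, t, cv =>
    let p := countRun x xs          -- run of x has p.1 + 1 copies, p.2 remains
    let g := gapB t cv x
    if g.1 > 2 ∧ g.2 + 1 = x then procB p.2 (g.1 - 2 + ((p.1 : Int) + 1)) x
    else if g.1 < 2 then false
    else procB p.2 ((p.1 : Int) + 1) x
termination_by l _ _ => l.length
decreasing_by
  · exact Nat.lt_succ_of_le (countRun_snd_length _ _)
  · exact Nat.lt_succ_of_le (countRun_snd_length _ _)

def solve_alt (n : Int) (case : List Int) : Bool :=
  procB (PySem.List.sorted case (fun x => x) false) 2 0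

-- ===== PRECONDITION & SPEC =====
-- A raises IndexError on the empty list (case[0]); nothing else raises.
def Pre_solve (n : Int) (case : List Int) : Prop := case ≠ []
instance (n : Int) (case : List Int) : Decidable (Pre_solve n case) := by unfold Pre_solve; infer_instance
def pvWitness_solve : Int × List Int := (3, [1, 1, 2])

def Spec_solve (n : Int) (case : List Int) (out : Bool) : Prop := out = solve_alt n case
instance (n : Int) (case : List Int) (out : Bool) : Decidable (Spec_solve n case out) := by unfold Spec_solve; infer_instance

-- ===== CLAIM (what is proved, stated in full; the proofs are below) =====
def Claim_equal_solve : Prop := ∀ (n : Int) (case : List Int), Dom_solve n case → Pre_solve n case → Spec_solve n case (solve n case)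

-- ===== LEMMAS AND PROOFS =====

theorem countRun_decomp (v : Int) (l : List Int) (hs : l.Pairwise (· ≤ ·)) (hge : ∀ y ∈ l, v ≤ y) :
    l = List.replicate (countRun v l).1 v ++ (countRun v l).2 ∧
    (countRun v l).2.Pairwise (· ≤ ·) ∧ (∀ y ∈ (countRun v l).2, v < y) := by
  induction l with
  | nil => simp [countRun]
  | cons x xs ih =>
    rcases List.pairwise_cons.mp hs with ⟨hx, hxs⟩
    by_cases h : x = v
    · subst h
      obtain ⟨h1, h2, h3⟩ := ih hxs (fun y hy => le_trans (hge x (by simp)) (hx y hy))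
      refine ⟨?_, ?_, ?_⟩ <;> simp [countRun, List.replicate_succ] <;> [exact h1; exact h2; exact h3]
    · refine ⟨by simp [countRun, h], by simp [countRun, h, hs], ?_⟩
      have hvx : v < x := lt_of_le_of_ne (hge x (by simp)) (fun e => h e.symm)
      intro y hy
      simp [countRun, h] at hy
      rcases hy with rfl | hy
      · exact hvx
      · exact lt_of_lt_of_le hvx (hx y hy)

theorem bumpRun_replicate (cv : Int) (k : Nat) (rest : List Int) (h : ∀ y ∈ rest, y ≠ cv) :
    bumpRun cv (List.replicate k cv ++ rest) = List.replicate k (cv + 1) ++ rest := by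
  induction k with
  | zero =>
    cases rest with
    | nil => rfl
    | cons y ys => simp [bumpRun, h y (by simp)]
  | succ k ih => simp [List.replicate_succ, bumpRun, ih]

theorem gapB_step (t cv v : Int) (ht : t > 2) (hlt : cv + 1 < v) :
    gapB t cv v = gapB (t - 2) (cv + 1) v := by
  rw [gapB]
  simp [ht, hlt]

theorem procB_gap_step (x : Int) (xs : List Int) (t cv : Int) (ht : t > 2) (hlt : cv + 1 < x) :
    procB (x :: xs) t cv = procB (x :: xs) (t - 2) (cv + 1) := by
  rw [procB, procB, gapB_step t cv x ht hlt]

theorem keyAux (N : Nat) (rest : List Int) (cv r : Int) (m : Nat)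
    (hs : rest.Pairwise (· ≤ ·)) (hgt : ∀ y ∈ rest, cv < y)
    (hr0 : 0 ≤ r) (hr2 : r ≤ 2) (hN : m + rest.length ≤ N) :
    procA (List.replicate m cv ++ rest) cv r = procB rest (r + m) cv := by
  induction N generalizing rest cv r m with
  | zero =>
    have hm : m = 0 := by omega
    have hrest : rest = [] := List.eq_nil_of_length_eq_zero (by omega)
    subst hm hrest
    simp [procA, procB]
  | succ N ih =>
    cases m with
    | zero =>
      simp only [List.replicate_zero, List.nil_append, Nat.cast_zero, add_zero]
      cases rest with
      | nil => simp [procA, procB]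
      | cons x xs =>
        have hx : cv < x := hgt x (by simp)
        have hne : ¬ (x = cv) := by omega
        have hgap : gapB r cv x = (r, cv) := by rw [gapB, if_neg (by omega)]
        rw [procA, if_neg hne, procB]
        by_cases hrlt : r < 2
        · simp [hgap, hrlt, show ¬ (r > 2) by omega]
        · have hr2' : r = 2 := by omega
          obtain ⟨hdec, hp2, hgt2⟩ :=
            countRun_decomp x xs (List.pairwise_cons.mp hs).2 (List.pairwise_cons.mp hs).1
          have hlen : xs.length = (countRun x xs).1 + (countRun x xs).2.length := by
            have := congrArg List.length hdec; simpa using this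
          rw [if_neg hrlt]
          conv_lhs => rw [hdec]
          rw [ih (countRun x xs).2 x 1 (countRun x xs).1 hp2 hgt2 (by omega) (by omega)
            (by simp at hN; omega)]
          have ht : (1 : Int) + ((countRun x xs).1 : Int) = ((countRun x xs).1 : Int) + 1 := by ring
          simp only [hgap, ht]
          rw [if_neg (by omega), if_neg (by omega)]
    | succ k =>
      rw [List.replicate_succ, List.cons_append, procA, if_pos rfl]
      by_cases hb : r + 1 > 2
      · have hr2' : r = 2 := by omega
        have hrest_ne : ∀ y ∈ rest, y ≠ cv := fun y hy => by have := hgt y hy; omega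
        rw [if_pos hb, bumpRun_replicate cv k rest hrest_ne]
        cases rest with
        | nil =>
          rw [ih [] (cv + 1) 1 k (by simp) (by simp) (by omega) (by omega) (by simp; omega)]
          simp [procB]
        | cons x xs =>
          have hx : cv < x := hgt x (by simp)
          by_cases hxe : x = cv + 1
          · subst hxe
            obtain ⟨hdec, hp2, hgt2⟩ :=
              countRun_decomp (cv + 1) xs (List.pairwise_cons.mp hs).2 (List.pairwise_cons.mp hs).1
            have hlen : xs.length = (countRun (cv + 1) xs).1 + (countRun (cv + 1) xs).2.length := by
              have := congrArg List.length hdec; simpa using this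
            have hassemble : List.replicate k (cv + 1) ++ (cv + 1) :: xs =
                List.replicate (k + 1 + (countRun (cv + 1) xs).1) (cv + 1) ++ (countRun (cv + 1) xs).2 := by
              conv_lhs => rw [hdec]
              rw [List.replicate_add, List.replicate_succ']
              simp [List.append_assoc]
            rw [hassemble,
              ih (countRun (cv + 1) xs).2 (cv + 1) 1 (k + 1 + (countRun (cv + 1) xs).1) hp2 hgt2
                (by omega) (by omega) (by simp at hN ⊢; omega),
              procB]
            have hgap : gapB (r + ((k : Int) + 1)) cv (cv + 1) = (r + ((k : Int) + 1), cv) := by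
              rw [gapB, if_neg (by omega)]
            simp only [Nat.cast_succ, hgap]
            rw [if_pos (by refine ⟨by omega, by trivial⟩)]
            have ht : (1 : Int) + ((k + 1 + (countRun (cv + 1) xs).1 : Nat) : Int) =
                r + ((k : Int) + 1) - 2 + (((countRun (cv + 1) xs).1 : Int) + 1) := by
              push_cast; omega
            rw [ht]
          · have hx1 : cv + 1 < x := by omega
            have hgt' : ∀ y ∈ x :: xs, cv + 1 < y := by
              intro y hy
              rcases List.mem_cons.mp hy with rfl | hy
              · exact hx1
              · have := (List.pairwise_cons.mp hs).1 y hy; omega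
            rw [ih (x :: xs) (cv + 1) 1 k hs hgt' (by omega) (by omega) (by simp at hN ⊢; omega)]
            rw [procB_gap_step x xs (r + ((k + 1 : Nat) : Int)) cv (by push_cast; omega) hx1]
            have ht : (1 : Int) + (k : Int) = r + ((k + 1 : Nat) : Int) - 2 := by
              push_cast; omega
            rw [ht]
      · rw [if_neg hb, ih rest cv (r + 1) k hs hgt (by omega) (by omega) (by omega)]
        have ht : r + 1 + (k : Int) = r + ((Nat.succ k : Nat) : Int) := by push_cast; ring
        rw [ht]

theorem key (rest : List Int) (cv r : Int) (m : Nat)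
    (hs : rest.Pairwise (· ≤ ·)) (hgt : ∀ y ∈ rest, cv < y)
    (hr0 : 0 ≤ r) (hr2 : r ≤ 2) :
    procA (List.replicate m cv ++ rest) cv r = procB rest (r + m) cv :=
  keyAux (m + rest.length) rest cv r m hs hgt hr0 hr2 le_rfl

-- ===== VERDICT (by name: the statement is the Claim_ definition above) =====
theorem solve_spec : Claim_equal_solve := by
  unfold Claim_equal_solve
  intro n case _ hpre
  unfold Spec_solve solve solve_alt
  cases hsl : PySem.List.sorted case (fun x => x) false with
  | nil =>
    exact absurd ((PySem.List.sorted_eq_nil_iff case (fun x => x) false).mp hsl) hpre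
  | cons x xs =>
    have hp : (x :: xs).Pairwise (· ≤ ·) := by
      have h := PySem.List.sorted_pairwise case (fun x => x)
      rw [hsl] at h
      simpa using h
    obtain ⟨hdec, hp2, hgt2⟩ :=
      countRun_decomp x xs (List.pairwise_cons.mp hp).2 (List.pairwise_cons.mp hp).1
    have hx : x :: xs = List.replicate ((countRun x xs).1 + 1) x ++ (countRun x xs).2 := by
      rw [List.replicate_succ, List.cons_append]
      exact congrArg (x :: ·) hdec
    simp only []
    conv_lhs => rw [hx]
    rw [key (countRun x xs).2 x 0 ((countRun x xs).1 + 1) hp2 hgt2 le_rfl (by omega)]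
    rw [procB]
    have hgap : gapB 2 0 x = (2, 0) := by rw [gapB, if_neg (by omega)]
    simp only [hgap]
    rw [if_neg (by omega), if_neg (by omega)]
    have ht : (0 : Int) + (((countRun x xs).1 + 1 : Nat) : Int) = ((countRun x xs).1 : Int) + 1 := by
      push_cast; ring
    rw [ht]
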